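-- pv_equiv track=rewrite | github.com/yogeshdewangan/Python-Excersise | listPrograms/get_range_add_consicutive.py | merge_consecutive_numbers
-- ===== SOURCE A (Python) =====
-- def merge_consecutive_numbers(nums):
--     if not nums:
--         return []
--
--     nums = sorted(set(nums))  # Sort and remove duplicates
--     result = []
--     start = nums[0]
--     prev = nums[0]
--
--     for num in nums[1:]:
--         if num == prev + 1:
--             prev = num
--         else:
--             if start == prev:
--                 result.append(f"{start}")
--             else:
--                 result.append(f"{start}-{prev}")
--             start = prev = num
--
--     # Append the last processed range or number
--     if start == prev:
--         result.append(f"{start}")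
--     else:
--         result.append(f"{start}-{prev}")
--
--     return result
-- ===== SOURCE B (Python) =====
-- def merge_consecutive_numbers(nums):
--     if not nums:
--         return []
--     s = set(nums)
--     xs = sorted(s)
--     starts = [x for x in xs if x - 1 not in s]
--     ends = [x for x in xs if x + 1 not in s]
--     return [f"{a}" if a == b else f"{a}-{b}" for a, b in zip(starts, ends)]
-- ===== Notes on version B (the rewrite author's own statement) =====
-- stated objective: alternative
-- what changed: Replaces A's sequential start/prev state machine with run-boundary detection by set membership: run starts are the sorted values x with x-1 not in the set, run ends those with x+1 not in the set, and the answer is the zip of the two filtered lists formatted pairwise.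
import Mathlib
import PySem

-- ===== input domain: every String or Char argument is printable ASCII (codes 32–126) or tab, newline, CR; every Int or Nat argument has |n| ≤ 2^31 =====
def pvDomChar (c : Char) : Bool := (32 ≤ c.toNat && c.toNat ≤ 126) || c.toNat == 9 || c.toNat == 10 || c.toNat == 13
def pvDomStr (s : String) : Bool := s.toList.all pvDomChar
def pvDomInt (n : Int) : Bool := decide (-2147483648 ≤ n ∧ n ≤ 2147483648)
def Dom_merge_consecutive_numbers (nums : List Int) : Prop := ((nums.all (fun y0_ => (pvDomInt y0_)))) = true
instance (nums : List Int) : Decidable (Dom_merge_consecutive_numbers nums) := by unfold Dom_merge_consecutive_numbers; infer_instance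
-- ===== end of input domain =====

-- B replaces A's sequential start/prev state machine by run-boundary detection via set
-- membership: starts = sorted values x with x-1 not in the set, ends = those with x+1 not in
-- the set, zipped pairwise into labels; alternative algorithm, same cost.

-- ===== PORT A =====
-- loop body of A's for-loop: state (result, start, prev)
def mcnStepA (s : List String × Int × Int) (num : Int) : List String × Int × Int :=
  match s with
  | (result, start, prev) =>
    if num = prev + 1 then (result, start, num)
    else
      (result ++ [if start = prev then PySem.Int.toStr start
                  else PySem.Int.toStr start ++ "-" ++ PySem.Int.toStr prev], num, num)

def merge_consecutive_numbers (nums : List Int) : List String :=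
  if nums = [] then []
  else
    let xs := PySem.List.sorted (PySem.Set.ofList nums) (fun x => x) false
    match xs with
    | [] => []  -- unreachable: nums ≠ [] so sorted(set(nums)) ≠ []
    | x0 :: rest =>
      match rest.foldl mcnStepA ([], x0, x0) with
      | (result, start, prev) =>
        result ++ [if start = prev then PySem.Int.toStr start
                   else PySem.Int.toStr start ++ "-" ++ PySem.Int.toStr prev]

-- ===== PORT B =====
def merge_consecutive_numbers_alt (nums : List Int) : List String :=
  if nums = [] then []
  else
    let s := PySem.Set.ofList nums
    let xs := PySem.List.sorted s (fun x => x) false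
    let starts := xs.filter (fun x => !(s.contains (x - 1)))
    let ends := xs.filter (fun x => !(s.contains (x + 1)))
    (starts.zip ends).map (fun p => if p.1 = p.2 then PySem.Int.toStr p.1
                                    else PySem.Int.toStr p.1 ++ "-" ++ PySem.Int.toStr p.2)

-- ===== PRECONDITION & SPEC =====
def Spec_merge_consecutive_numbers (nums : List Int) (out : List String) : Prop := out = merge_consecutive_numbers_alt nums
instance (nums : List Int) (out : List String) : Decidable (Spec_merge_consecutive_numbers nums out) := by unfold Spec_merge_consecutive_numbers; infer_instance

-- ===== CLAIM (what is proved, stated in full; the proofs are below) =====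
def Claim_equal_merge_consecutive_numbers : Prop := ∀ (nums : List Int), Dom_merge_consecutive_numbers nums → Spec_merge_consecutive_numbers nums (merge_consecutive_numbers nums)

-- ===== LEMMAS AND PROOFS =====

-- the run label both programs emit
def mcnLabel (p : Int × Int) : String :=
  if p.1 = p.2 then PySem.Int.toStr p.1 else PySem.Int.toStr p.1 ++ "-" ++ PySem.Int.toStr p.2

-- reference recursion: the (start, end) pairs of the maximal consecutive runs
def mcnPairs (s p : Int) (t : List Int) : List (Int × Int) :=
  match t with
  | [] => [(s, p)]
  | r :: rs => if r = p + 1 then mcnPairs s r rs else (s, p) :: mcnPairs r r rs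

-- A's foldl with final flush equals mapping labels over the run pairs
theorem foldA_eq_pairs (rest : List Int) (res : List String) (start prev : Int) :
    (rest.foldl mcnStepA (res, start, prev)).1 ++
      [if (rest.foldl mcnStepA (res, start, prev)).2.1 = (rest.foldl mcnStepA (res, start, prev)).2.2 then
         PySem.Int.toStr (rest.foldl mcnStepA (res, start, prev)).2.1
       else PySem.Int.toStr (rest.foldl mcnStepA (res, start, prev)).2.1 ++ "-" ++
         PySem.Int.toStr (rest.foldl mcnStepA (res, start, prev)).2.2]
    = res ++ (mcnPairs start prev rest).map mcnLabel := by
  induction rest generalizing res start prev with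
  | nil => simp [mcnPairs, mcnLabel]
  | cons r rs ih =>
    simp only [List.foldl_cons, mcnStepA, mcnPairs]
    by_cases h : r = prev + 1
    · simp only [if_pos h, ih]
    · simp only [if_neg h, ih, List.map_cons, mcnLabel, List.append_assoc, List.cons_append,
        List.nil_append]

-- in a strictly increasing list, r-1 occurs iff the element just before r equals r-1
theorem adj_pred_mem (pre : List Int) (p r : Int) (rs : List Int)
    (h : (pre ++ p :: r :: rs).Pairwise (· < ·)) :
    ((r - 1) ∈ pre ++ p :: r :: rs) ↔ r = p + 1 := by
  rw [List.pairwise_append] at h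
  obtain ⟨_, h2, h3⟩ := h
  rw [List.pairwise_cons] at h2
  obtain ⟨hp, h2⟩ := h2
  rw [List.pairwise_cons] at h2
  obtain ⟨hr, _⟩ := h2
  have hpr : p < r := hp r (by simp)
  constructor
  · intro hm
    rcases List.mem_append.mp hm with hl | hc
    · have := h3 _ hl p (by simp); omega
    · simp only [List.mem_cons] at hc
      rcases hc with h1 | h1 | h1
      · omega
      · omega
      · have := hr _ h1; omega
  · intro he; simp [List.mem_append]; omega

-- in a strictly increasing list, p+1 occurs iff the element just after p equals p+1
theorem adj_succ_mem (pre : List Int) (p r : Int) (rs : List Int)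
    (h : (pre ++ p :: r :: rs).Pairwise (· < ·)) :
    ((p + 1) ∈ pre ++ p :: r :: rs) ↔ r = p + 1 := by
  rw [List.pairwise_append] at h
  obtain ⟨_, h2, h3⟩ := h
  rw [List.pairwise_cons] at h2
  obtain ⟨hp, h2⟩ := h2
  rw [List.pairwise_cons] at h2
  obtain ⟨hr, _⟩ := h2
  have hpr : p < r := hp r (by simp)
  constructor
  · intro hm
    rcases List.mem_append.mp hm with hl | hc
    · have := h3 _ hl p (by simp); omega
    · simp only [List.mem_cons] at hc
      rcases hc with h1 | h1 | h1
      · omega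
      · omega
      · have := hr _ h1; omega
  · intro he; simp [List.mem_append]; omega

-- the successor of the last element of a strictly increasing list is not in it
theorem last_succ_not_mem (pre : List Int) (p : Int)
    (h : (pre ++ [p]).Pairwise (· < ·)) : (p + 1) ∉ pre ++ [p] := by
  rw [List.pairwise_append] at h
  obtain ⟨_, _, h3⟩ := h
  intro hm
  rcases List.mem_append.mp hm with hl | hc
  · have := h3 _ hl p (by simp); omega
  · simp at hc

-- the predecessor of the head of a strictly increasing list is not in it
theorem head_pred_not_mem (x0 : Int) (rest : List Int)
    (h : (x0 :: rest).Pairwise (· < ·)) : (x0 - 1) ∉ x0 :: rest := by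
  rw [List.pairwise_cons] at h
  intro hm
  rcases List.mem_cons.mp hm with h1 | h1
  · omega
  · have := h.1 _ h1; omega

-- the run starts are exactly the elements whose predecessor is absent
theorem pairs_fst (xs : List Int) (hxs : xs.Pairwise (· < ·)) :
    ∀ (t pre : List Int) (s p : Int), xs = pre ++ p :: t →
    (mcnPairs s p t).map Prod.fst = s :: t.filter (fun x => decide ((x - 1) ∉ xs)) := by
  intro t
  induction t with
  | nil => intro pre s p _; simp [mcnPairs]
  | cons r rs ih =>
    intro pre s p heq
    have hadj : ((r - 1) ∈ xs) ↔ r = p + 1 := by rw [heq] at hxs ⊢; exact adj_pred_mem pre p r rs hxs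
    have heq' : xs = (pre ++ [p]) ++ r :: rs := by simp [heq]
    simp only [mcnPairs]
    by_cases h : r = p + 1
    · have hd : (r - 1) ∈ xs := hadj.mpr h
      rw [if_pos h, ih (pre ++ [p]) s r heq']
      conv_rhs => rw [List.filter_cons]
      simp [hd]
    · have hd : (r - 1) ∉ xs := fun hm => h (hadj.mp hm)
      rw [if_neg h, List.map_cons, ih (pre ++ [p]) r r heq']
      conv_rhs => rw [List.filter_cons]
      simp [hd]
  -- (induction gives the statement for every suffix; applied with pre = [] below)

-- the run ends are exactly the elements whose successor is absent
theorem pairs_snd (xs : List Int) (hxs : xs.Pairwise (· < ·)) :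
    ∀ (t pre : List Int) (s p : Int), xs = pre ++ p :: t →
    (mcnPairs s p t).map Prod.snd = (p :: t).filter (fun x => decide ((x + 1) ∉ xs)) := by
  intro t
  induction t with
  | nil =>
    intro pre s p heq
    have : (p + 1) ∉ xs := by rw [heq] at hxs ⊢; exact last_succ_not_mem pre p hxs
    simp [mcnPairs, this]
  | cons r rs ih =>
    intro pre s p heq
    have hadj : ((p + 1) ∈ xs) ↔ r = p + 1 := by rw [heq] at hxs ⊢; exact adj_succ_mem pre p r rs hxs
    have heq' : xs = (pre ++ [p]) ++ r :: rs := by simp [heq]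
    simp only [mcnPairs]
    by_cases h : r = p + 1
    · have hd : (p + 1) ∈ xs := hadj.mpr h
      rw [if_pos h, ih (pre ++ [p]) s r heq']
      conv_rhs => rw [List.filter_cons]
      simp [hd]
    · have hd : (p + 1) ∉ xs := fun hm => h (hadj.mp hm)
      rw [if_neg h, List.map_cons, ih (pre ++ [p]) r r heq']
      conv_rhs => rw [List.filter_cons]
      simp [hd]

-- membership-based filters over the sorted set list; B's contains tests reduce to these
theorem alt_core (x0 : Int) (rest : List Int) (hxs : (x0 :: rest).Pairwise (· < ·)) :
    (((x0 :: rest).filter (fun x => decide ((x - 1) ∉ x0 :: rest))).zip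
      ((x0 :: rest).filter (fun x => decide ((x + 1) ∉ x0 :: rest)))).map mcnLabel
    = (mcnPairs x0 x0 rest).map mcnLabel := by
  have hhead : (decide ((x0 - 1) ∉ x0 :: rest)) = true := by
    simp only [decide_eq_true_eq]; exact head_pred_not_mem x0 rest hxs
  have hfst := pairs_fst (x0 :: rest) hxs rest [] x0 x0 rfl
  have hsnd := pairs_snd (x0 :: rest) hxs rest [] x0 x0 rfl
  have h1 : (x0 :: rest).filter (fun x => decide ((x - 1) ∉ x0 :: rest))
      = x0 :: rest.filter (fun x => decide ((x - 1) ∉ x0 :: rest)) := by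
    rw [List.filter_cons, hhead]
    simp
  rw [h1, ← hfst, ← hsnd, List.zip_map']
  congr 1
  simp

-- ===== VERDICT (by name: the statement is the Claim_ definition above) =====
theorem merge_consecutive_numbers_spec : Claim_equal_merge_consecutive_numbers := by
  intro nums _
  unfold Spec_merge_consecutive_numbers merge_consecutive_numbers merge_consecutive_numbers_alt
  by_cases hnil : nums = []
  · simp [hnil]
  · simp only [if_neg hnil]
    have hpw := PySem.List.sorted_ofList_pairwise_lt (xs := nums)
    have hperm := PySem.List.sorted_perm (xs := PySem.Set.ofList nums) (key := fun x => x) (rev := false)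
    -- B's membership tests against the set equal membership in the sorted list
    have hmem : ∀ y : Int, ((PySem.Set.ofList nums).contains y)
        = decide (y ∈ PySem.List.sorted (PySem.Set.ofList nums) (fun x => x) false) := by
      intro y
      simp [hperm.mem_iff]
    have hf1 : (PySem.List.sorted (PySem.Set.ofList nums) (fun x => x) false).filter
          (fun x => !((PySem.Set.ofList nums).contains (x - 1)))
        = (PySem.List.sorted (PySem.Set.ofList nums) (fun x => x) false).filter
          (fun x => decide ((x - 1) ∉ PySem.List.sorted (PySem.Set.ofList nums) (fun x => x) false)) := by
      apply List.filter_congr; intro x _; rw [hmem]; simp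
    have hf2 : (PySem.List.sorted (PySem.Set.ofList nums) (fun x => x) false).filter
          (fun x => !((PySem.Set.ofList nums).contains (x + 1)))
        = (PySem.List.sorted (PySem.Set.ofList nums) (fun x => x) false).filter
          (fun x => decide ((x + 1) ∉ PySem.List.sorted (PySem.Set.ofList nums) (fun x => x) false)) := by
      apply List.filter_congr; intro x _; rw [hmem]; simp
    rw [hf1, hf2]
    generalize hg : PySem.List.sorted (PySem.Set.ofList nums) (fun x => x) false = xs at *
    cases xs with
    | nil => simp
    | cons x0 rest =>
      have hB := alt_core x0 rest hpw
      have hA := foldA_eq_pairs rest [] x0 x0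
      simp only [List.nil_append] at hA
      exact hA.trans hB.symm
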